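-- pv_equiv track=rewrite | github.com/msampaio/harpa | core.py | get_prime_form
-- ===== SOURCE A (Python) =====
-- def diff(a, b):
--     return (a - b) % 12
--
-- def rotate(s, ind):
--     return s[ind:] + s[:ind]
--
-- def intervals(s):
--     return [diff(b, a) for a, b in zip(s, s[1:])]
--
-- def renumerate(s):
--     r = [0]
--     for i in s:
--         r.append((r[-1] + i) % 12)
--     return r
--
-- def invert(s):
--     return [(12 - i) % 12 for i in s]
--
-- def get_prime_form(s):
--     seq = sorted(list(set(s)))
--     d = {}
--     for i in range(len(seq)):
--         r = rotate(seq, i)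
--         ordinal = r
--         inverted = invert(r)
--
--         for current_s in [ordinal, inverted]:
--             intervals_seq = intervals(current_s)
--             ret_intervals_seq = intervals_seq[:]
--             ret_intervals_seq.reverse()
--
--             for current_i_seq in [intervals_seq, ret_intervals_seq]:
--                 distance = sum(current_i_seq)
--                 if distance not in d:
--                     d[distance] = []
--                 d[distance].append(current_i_seq)
--
--     lowest_distance = sorted(d.keys())[0]
--     more_compact = sorted(d[lowest_distance])[0]
--     return renumerate(more_compact)
-- ===== SOURCE B (Python) =====
-- def renumerate(s):
--     r = [0]
--     for i in s:
--         r.append((r[-1] + i) % 12)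
--     return r
--
-- def get_prime_form(s):
--     seq = sorted(set(s))
--     n = len(seq)
--     cyc = [(seq[(j + 1) % n] - seq[j]) % 12 for j in range(n)]
--     inv = [(12 - d) % 12 for d in cyc]
--     best = None
--     for c in (cyc, cyc[::-1], inv, inv[::-1]):
--         dbl = c + c
--         for k in range(n):
--             w = dbl[k:k + n - 1]
--             key = (sum(w), w)
--             if best is None or key < best[0]:
--                 best = (key, w)
--     return renumerate(best[1])
-- ===== Notes on version B (the rewrite author's own statement) =====
-- stated objective: faster
-- what changed: B never rotates the pitch-class list nor recomputes interval vectors per rotation: it builds the circular interval cycle once, derives its reversed and inverted cycles, enumerates candidates as fixed-length sliding windows of each doubled cycle, and tracks the best (sum, lex) candidate online instead of A's dict-of-lists grouped by interval-sum with two sorts.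
import Mathlib
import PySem

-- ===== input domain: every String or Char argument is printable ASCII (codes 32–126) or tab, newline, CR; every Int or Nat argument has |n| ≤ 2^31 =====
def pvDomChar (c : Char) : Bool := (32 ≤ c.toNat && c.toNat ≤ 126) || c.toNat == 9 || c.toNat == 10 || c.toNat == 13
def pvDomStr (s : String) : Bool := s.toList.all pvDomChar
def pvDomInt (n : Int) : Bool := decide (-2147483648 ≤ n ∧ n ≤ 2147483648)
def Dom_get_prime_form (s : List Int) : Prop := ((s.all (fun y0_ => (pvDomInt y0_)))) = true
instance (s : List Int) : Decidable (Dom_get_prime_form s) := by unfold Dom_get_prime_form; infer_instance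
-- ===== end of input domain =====

-- B never rotates the pitch-class list nor recomputes interval vectors per rotation: it
-- builds the circular interval cycle once, derives its reversed and inverted cycles, takes
-- candidates as sliding windows of each doubled cycle, and tracks the best (sum, lex)
-- candidate online instead of A's dict grouped by interval-sum with two sorts; the timing
-- run measured B faster on the generated inputs.

-- ===== PORT A =====
-- shared same-module helpers (diff, rotate, intervals, renumerate, invert)
def pf_diff (a b : Int) : Int := PySem.Int.mod (a - b) 12

def pf_rotate (s : List Int) (ind : Int) : List Int :=
  PySem.List.slice s (some ind) none ++ PySem.List.slice s none (some ind)

def pf_intervals (s : List Int) : List Int :=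
  (s.zip (PySem.List.slice s (some 1) none)).map (fun p => pf_diff p.2 p.1)

def pf_renumerate (s : List Int) : List Int :=
  s.foldl (fun r i => r ++ [PySem.Int.mod (PySem.List.pyGetD r (-1) 0 + i) 12]) [0]

def pf_invert (s : List Int) : List Int := s.map (fun i => PySem.Int.mod (12 - i) 12)

def get_prime_form (s : List Int) : List Int :=
  let seq := PySem.List.sorted (PySem.Set.ofList s) (fun x => x)
  let d := (PySem.List.pyRange 0 (PySem.List.len seq) 1).foldl (fun d i =>
    let r := pf_rotate seq i
    let ordinal := r
    let inverted := pf_invert r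
    [ordinal, inverted].foldl (fun d current_s =>
      let intervals_seq := pf_intervals current_s
      let ret_intervals_seq := intervals_seq.reverse
      [intervals_seq, ret_intervals_seq].foldl (fun d current_i_seq =>
        let distance := current_i_seq.sum
        let d' := if d.contains distance then d else d.insert distance ([] : List (List Int))
        d'.modify distance [] (fun v => v ++ [current_i_seq])) d) d)
    (PySem.Dict.empty)
  match PySem.List.sorted d.keys (fun x => x) with
  | [] => []          -- sorted(d.keys())[0] raises IndexError here (only for s = []; outside Pre_)
  | lowest :: _ =>
    match PySem.List.sorted (d.getD lowest []) (fun x => x) with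
    | [] => []        -- unreachable: d maps every key to a nonempty list
    | m :: _ => pf_renumerate m

-- ===== PORT B =====
-- Python's `<` on int lists / on (int, int-list) pairs, ported by hand (exact for these types)
def pf_listLt : List Int → List Int → Bool
  | _, [] => false
  | [], _ :: _ => true
  | a :: as, b :: bs => if a < b then true else if b < a then false else pf_listLt as bs

def pf_keyLtB (a b : Int × List Int) : Bool :=
  decide (a.1 < b.1) || (decide (a.1 = b.1) && pf_listLt a.2 b.2)

def get_prime_form_alt (s : List Int) : List Int :=
  let seq := PySem.List.sorted (PySem.Set.ofList s) (fun x => x)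
  let n := PySem.List.len seq
  let cyc := (PySem.List.pyRange 0 n 1).map (fun j =>
    PySem.Int.mod (PySem.List.pyGetD seq (PySem.Int.mod (j + 1) n) 0
      - PySem.List.pyGetD seq j 0) 12)
  let inv := cyc.map (fun d => PySem.Int.mod (12 - d) 12)
  let best := [cyc, cyc.reverse, inv, inv.reverse].foldl (fun best c =>
    let dbl := c ++ c
    (PySem.List.pyRange 0 n 1).foldl (fun best k =>
      let w := PySem.List.slice dbl (some k) (some (k + n - 1))
      let key := (w.sum, w)
      match best with
      | none => some (key, w)
      | some b => if pf_keyLtB key b.1 then some (key, w) else best) best) none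
  match best with
  | none => []        -- best[1] raises TypeError here (only for s = []; outside Pre_)
  | some b => pf_renumerate b.2

-- ===== PRECONDITION & SPEC =====
-- A raises IndexError on the empty list (its dict stays empty); Pre_ excludes exactly that input.
def Pre_get_prime_form (s : List Int) : Prop := s ≠ []
instance (s : List Int) : Decidable (Pre_get_prime_form s) := by unfold Pre_get_prime_form; infer_instance
def pvWitness_get_prime_form : List Int := ([0, 4, 7])

def Spec_get_prime_form (s : List Int) (out : List Int) : Prop := out = get_prime_form_alt s
instance (s : List Int) (out : List Int) : Decidable (Spec_get_prime_form s out) := by unfold Spec_get_prime_form; infer_instance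

-- ===== CLAIM (what is proved, stated in full; the proofs are below) =====
def Claim_equal_get_prime_form : Prop := ∀ (s : List Int), Dom_get_prime_form s → Pre_get_prime_form s → Spec_get_prime_form s (get_prime_form s)

-- ===== LEMMAS AND PROOFS =====

-- instance bridge: the ports' default DecidableLT on List Int vs the LinearOrder one
theorem pf_inst_bridge : (fun (a b : List Int) => a.decidableLT b) = (fun a b => @LinearOrder.toDecidableLT _ List.instLinearOrder a b) := by
  funext a b; exact Subsingleton.elim _ _

-- the arithmetic identity behind B's inverted cycle: intervals ∘ invert = invert ∘ intervals
theorem pf_intervals_invert (r : List Int) : pf_intervals (pf_invert r) = pf_invert (pf_intervals r) := by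
  have hmod : ∀ x : Int, PySem.Int.mod x 12 = x % 12 := fun x => PySem.Int.mod_eq_emod_of_pos (by norm_num)
  unfold pf_intervals pf_invert
  rw [PySem.List.slice_from _ (by norm_num), PySem.List.slice_from _ (by norm_num),
    ← List.map_drop, List.zip_map, List.map_map, List.map_map]
  apply List.map_congr_left
  intro ⟨a, b⟩ _
  simp only [Function.comp, Prod.map, pf_diff, hmod]
  omega

-- the grouping step of A's dict loop, named
def pf_step (d : PySem.Dict Int (List (List Int))) (c : List Int) : PySem.Dict Int (List (List Int)) :=
  let distance := c.sum
  let d' := if d.contains distance then d else d.insert distance ([] : List (List Int))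
  d'.modify distance [] (fun v => v ++ [c])

-- the flat candidate list A's dict loop effectively iterates over
def pf_chunk (seq : List Int) (i : Int) : List (List Int) :=
  [pf_intervals (pf_rotate seq i), (pf_intervals (pf_rotate seq i)).reverse,
   pf_intervals (pf_invert (pf_rotate seq i)), (pf_intervals (pf_invert (pf_rotate seq i))).reverse]

def pf_cands (seq : List Int) : List (List Int) :=
  (PySem.List.pyRange 0 (PySem.List.len seq) 1).flatMap (pf_chunk seq)

theorem pf_contains_iff (d : PySem.Dict Int (List (List Int))) (k : Int) :
    d.contains k = true ↔ k ∈ d.keys := by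
  simp [PySem.Dict.contains, PySem.Dict.keys, List.any_eq_true]

theorem pf_getD_not_contains (d : PySem.Dict Int (List (List Int))) (k : Int)
    (h : d.contains k = false) : d.getD k [] = [] := by
  unfold PySem.Dict.contains at h
  simp only [List.any_eq_false] at h
  simp [PySem.Dict.getD, PySem.Dict.get?, List.find?_eq_none.2 h]

theorem pf_keys_insert (d : PySem.Dict Int (List (List Int))) (k : Int) (v : List (List Int)) :
    (d.insert k v).keys = if d.contains k then d.keys else d.keys ++ [k] := by
  unfold PySem.Dict.insert
  by_cases h : d.contains k = true
  · rw [if_pos h, if_pos h]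
    simp only [PySem.Dict.keys, List.map_map]
    apply List.map_congr_left
    intro p _
    by_cases hp : p.1 = k <;> simp [hp]
  · rw [if_neg h, if_neg h]
    simp [PySem.Dict.keys]

theorem pf_getD_step (d : PySem.Dict Int (List (List Int))) (c : List Int) (k : Int) :
    (pf_step d c).getD k [] = if k = c.sum then d.getD k [] ++ [c] else d.getD k [] := by
  unfold pf_step PySem.Dict.modify
  dsimp only
  rw [PySem.Dict.getD_insert]
  by_cases hk : k = c.sum
  · subst hk
    rw [if_pos rfl, if_pos rfl]
    by_cases hc : d.contains c.sum = true
    · rw [if_pos hc]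
    · rw [if_neg hc, PySem.Dict.getD_insert, if_pos rfl,
        pf_getD_not_contains d _ (by simpa using hc)]
  · rw [if_neg hk, if_neg hk]
    by_cases hc : d.contains c.sum = true
    · rw [if_pos hc]
    · rw [if_neg hc, PySem.Dict.getD_insert, if_neg hk]

theorem pf_keys_step (d : PySem.Dict Int (List (List Int))) (c : List Int) :
    (pf_step d c).keys = PySem.Set.add d.keys c.sum := by
  unfold pf_step PySem.Dict.modify
  dsimp only
  rw [PySem.Set.add_eq_ite]
  by_cases h : d.contains c.sum = true
  · rw [if_pos h, pf_keys_insert, if_pos h, if_pos ((pf_contains_iff d c.sum).1 h)]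
  · have hm : c.sum ∉ d.keys := fun hh => h ((pf_contains_iff d c.sum).2 hh)
    have hcont : (d.insert c.sum ([] : List (List Int))).contains c.sum = true := by
      apply (pf_contains_iff _ _).2
      rw [pf_keys_insert, if_neg h]
      simp
    rw [if_neg h, pf_keys_insert, if_pos hcont, pf_keys_insert, if_neg h, if_neg hm]

theorem pf_getD_fold (l : List (List Int)) :
    ∀ (d : PySem.Dict Int (List (List Int))) (k : Int),
      (l.foldl pf_step d).getD k [] = d.getD k [] ++ l.filter (fun c => c.sum == k) := by
  induction l with
  | nil => intro d k; simp
  | cons c t ih =>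
    intro d k
    simp only [List.foldl_cons, List.filter_cons]
    rw [ih, pf_getD_step]
    by_cases hk : k = c.sum
    · simp [hk]
    · have hne : (c.sum == k) = false := beq_eq_false_iff_ne.2 (fun h => hk h.symm)
      rw [if_neg hk, hne]
      simp

theorem pf_keys_fold (l : List (List Int)) :
    ∀ (d : PySem.Dict Int (List (List Int))),
      (l.foldl pf_step d).keys = PySem.Set.update d.keys (l.map List.sum) := by
  induction l with
  | nil => intro d; simp [PySem.Set.update]
  | cons c t ih =>
    intro d
    simp only [List.foldl_cons, List.map_cons]
    rw [ih, pf_keys_step]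
    rfl

-- A's dict loop is the flat fold of pf_step over pf_cands
theorem pf_dict_eq (seq : List Int) :
    ((PySem.List.pyRange 0 (PySem.List.len seq) 1).foldl (fun d i =>
      let r := pf_rotate seq i
      let ordinal := r
      let inverted := pf_invert r
      [ordinal, inverted].foldl (fun d current_s =>
        let intervals_seq := pf_intervals current_s
        let ret_intervals_seq := intervals_seq.reverse
        [intervals_seq, ret_intervals_seq].foldl (fun d current_i_seq =>
          let distance := current_i_seq.sum
          let d' := if d.contains distance then d else d.insert distance ([] : List (List Int))
          d'.modify distance [] (fun v => v ++ [current_i_seq])) d) d)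
      (PySem.Dict.empty))
    = (pf_cands seq).foldl pf_step PySem.Dict.empty := by
  unfold pf_cands
  rw [List.foldl_flatMap]
  apply PySem.List.foldl_congr_mem
  intro d i _
  simp [pf_chunk, pf_step, List.foldl]

-- the order both programs minimise: interval-sum first, then lexicographic
def pf_le2 (a b : List Int) : Prop := a.sum < b.sum ∨ (a.sum = b.sum ∧ a ≤ b)

theorem pf_le2_trans {a b c : List Int} (h1 : pf_le2 a b) (h2 : pf_le2 b c) : pf_le2 a c := by
  unfold pf_le2 at *
  rcases h1 with h1 | ⟨h1, h1'⟩ <;> rcases h2 with h2 | ⟨h2, h2'⟩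
  · exact Or.inl (lt_trans h1 h2)
  · exact Or.inl (by omega)
  · exact Or.inl (by omega)
  · exact Or.inr ⟨by omega, le_trans h1' h2'⟩

def pf_IsMin (l : List (List Int)) (m : List Int) : Prop := m ∈ l ∧ ∀ y ∈ l, pf_le2 m y

theorem pf_IsMin_unique {l1 l2 : List (List Int)} {m1 m2 : List Int}
    (hmem : ∀ x, x ∈ l1 ↔ x ∈ l2) (h1 : pf_IsMin l1 m1) (h2 : pf_IsMin l2 m2) : m1 = m2 := by
  have h12 : pf_le2 m1 m2 := h1.2 m2 ((hmem m2).2 h2.1)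
  have h21 : pf_le2 m2 m1 := h2.2 m1 ((hmem m1).1 h1.1)
  unfold pf_le2 at h12 h21
  rcases h12 with h | ⟨_, h12⟩ <;> rcases h21 with h' | ⟨_, h21⟩
  · omega
  · omega
  · omega
  · exact le_antisymm h12 h21

-- A's two sorted heads pick exactly the pf_le2-minimum of the flat candidate list
theorem pf_heads_isMin (l : List (List Int)) (k0 : Int) (kt : List Int) (m : List Int) (mt : List (List Int))
    (hsk : PySem.List.sorted ((l.foldl pf_step PySem.Dict.empty).keys) (fun x => x) = k0 :: kt)
    (hsg : PySem.List.sorted ((l.foldl pf_step PySem.Dict.empty).getD k0 []) (fun x => x) = m :: mt) :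
    pf_IsMin l m := by
  have hkeys : (l.foldl pf_step PySem.Dict.empty).keys = PySem.Set.ofList (l.map List.sum) := by
    rw [pf_keys_fold]; rfl
  have hgrp : (l.foldl pf_step PySem.Dict.empty).getD k0 [] = l.filter (fun c => c.sum == k0) := by
    rw [pf_getD_fold]; rfl
  rw [hkeys] at hsk
  rw [hgrp] at hsg
  have hk0min : ∀ c ∈ l, k0 ≤ c.sum := by
    intro c hc
    exact PySem.List.key_head_sorted_le _ _ hsk _ ((PySem.Set.mem_ofList _ _).2 (List.mem_map_of_mem hc))
  have hmmem : m ∈ l.filter (fun c => c.sum == k0) := by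
    have : m ∈ PySem.List.sorted (l.filter (fun c => c.sum == k0)) (fun x => x) := by
      rw [hsg]; exact List.mem_cons_self
    exact (PySem.List.mem_sorted _ _ _ _).1 this
  obtain ⟨hml, hmsum⟩ := List.mem_filter.1 hmmem
  have hmsum : m.sum = k0 := by simpa using hmsum
  rw [pf_inst_bridge] at hsg
  have hmmin : ∀ y ∈ l.filter (fun c => c.sum == k0), m ≤ y :=
    PySem.List.key_head_sorted_le _ _ hsg
  refine ⟨hml, fun y hy => ?_⟩
  have hk0y : k0 ≤ y.sum := hk0min y hy
  by_cases hy0 : y.sum = k0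
  · have : y ∈ l.filter (fun c => c.sum == k0) := List.mem_filter.2 ⟨hy, by simpa using hy0⟩
    exact Or.inr ⟨by omega, hmmin y this⟩
  · exact Or.inl (by omega)

theorem pf_cands_ne_nil (s : List Int) (hs : s ≠ []) :
    pf_cands (PySem.List.sorted (PySem.Set.ofList s) (fun x => x)) ≠ [] := by
  set seq := PySem.List.sorted (PySem.Set.ofList s) (fun x => x) with hseq
  obtain ⟨a, t, rfl⟩ := List.exists_cons_of_ne_nil hs
  have ha : a ∈ seq := by
    rw [hseq]
    exact (PySem.List.mem_sorted _ _ _ _).2 ((PySem.Set.mem_ofList _ _).2 (by simp))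
  have hlen : 0 < seq.length := List.length_pos_of_mem ha
  have h0 : (0 : Int) ∈ PySem.List.pyRange 0 (PySem.List.len seq) 1 := by
    rw [PySem.List.mem_pyRange_one]
    constructor
    · omega
    · simp only [PySem.List.len]; exact_mod_cast hlen
  apply List.ne_nil_of_mem (a := pf_intervals (pf_rotate seq 0))
  unfold pf_cands
  rw [List.mem_flatMap]
  exact ⟨0, h0, by simp [pf_chunk]⟩

-- ===== B-side machinery: the circular interval cycle and its windows =====

-- Python list `<` is the lexicographic order Mathlib puts on List Int
theorem pf_listLt_iff : ∀ (a b : List Int), pf_listLt a b = true ↔ a < b := by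
  intro a
  induction a with
  | nil =>
    intro b
    cases b with
    | nil => simp [pf_listLt]
    | cons x xs =>
      simp only [pf_listLt, true_iff]
      exact List.nil_lt_cons x xs
  | cons a as ih =>
    intro b
    cases b with
    | nil => simp [pf_listLt]
    | cons x xs =>
      rw [List.cons_lt_cons_iff]
      simp only [pf_listLt]
      rcases lt_trichotomy a x with h | h | h
      · simp [h]
      · simp [h, ih]
      · rw [if_neg (by omega : ¬ a < x), if_pos h]
        simp only [Bool.false_eq_true, false_iff, not_or, not_and]
        exact ⟨by omega, fun he => absurd he (by omega)⟩

theorem pf_keyLtB_false_iff (w b : List Int) :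
    pf_keyLtB (w.sum, w) (b.sum, b) = false ↔ pf_le2 b w := by
  simp only [pf_keyLtB, Bool.or_eq_false_iff, Bool.and_eq_false_iff, decide_eq_false_iff_not]
  unfold pf_le2
  constructor
  · rintro ⟨h1, h2 | h2⟩
    · exact Or.inl (by omega)
    · by_cases hs : b.sum < w.sum
      · exact Or.inl hs
      · refine Or.inr ⟨by omega, ?_⟩
        have : ¬ w < b := by
          intro hlt
          rw [← pf_listLt_iff] at hlt
          simp [hlt] at h2
        exact le_of_not_gt this
  · intro h
    rcases h with h | ⟨h, hle⟩
    · exact ⟨by omega, Or.inl (by omega)⟩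
    · refine ⟨by omega, Or.inr ?_⟩
      rw [Bool.eq_false_iff]
      intro hlt
      rw [pf_listLt_iff] at hlt
      exact absurd hle (not_le_of_gt hlt)

theorem pf_keyLtB_true_le {w b : List Int}
    (h : pf_keyLtB (w.sum, w) (b.sum, b) = true) : pf_le2 w b := by
  simp only [pf_keyLtB, Bool.or_eq_true, Bool.and_eq_true, decide_eq_true_eq] at h
  rcases h with h | ⟨h1, h2⟩
  · exact Or.inl h
  · exact Or.inr ⟨h1, le_of_lt ((pf_listLt_iff _ _).1 h2)⟩

-- the online-best update B's inner loop performs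
def pf_upd (best : Option ((Int × List Int) × List Int)) (w : List Int) :
    Option ((Int × List Int) × List Int) :=
  let key := (w.sum, w)
  match best with
  | none => some (key, w)
  | some b => if pf_keyLtB key b.1 then some (key, w) else best

theorem pf_fold_some : ∀ (l : List (List Int)) (b : List Int),
    ∃ m, l.foldl pf_upd (some ((b.sum, b), b)) = some ((m.sum, m), m) ∧
      (m = b ∨ m ∈ l) ∧ pf_le2 m b ∧ ∀ y ∈ l, pf_le2 m y := by
  intro l
  induction l with
  | nil =>
    intro b
    exact ⟨b, rfl, Or.inl rfl, Or.inr ⟨rfl, le_refl _⟩, by simp⟩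
  | cons w t ih =>
    intro b
    rw [List.foldl_cons]
    by_cases h : pf_keyLtB (w.sum, w) (b.sum, b) = true
    · have hupd : pf_upd (some ((b.sum, b), b)) w = some ((w.sum, w), w) := by
        simp only [pf_upd]
        rw [if_pos h]
      rw [hupd]
      obtain ⟨m, hm, hmem, hle, hall⟩ := ih w
      have hwb : pf_le2 w b := pf_keyLtB_true_le h
      refine ⟨m, hm, ?_, pf_le2_trans hle hwb, ?_⟩
      · rcases hmem with h' | h'
        · exact Or.inr (by simp [h'])
        · exact Or.inr (List.mem_cons_of_mem _ h')
      · intro y hy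
        rcases List.mem_cons.1 hy with h' | h'
        · subst h'; exact hle
        · exact hall y h'
    · have hupd : pf_upd (some ((b.sum, b), b)) w = some ((b.sum, b), b) := by
        simp only [pf_upd]
        rw [if_neg h]
      rw [hupd]
      obtain ⟨m, hm, hmem, hle, hall⟩ := ih b
      have hbw : pf_le2 b w := (pf_keyLtB_false_iff w b).1 (by simpa using h)
      refine ⟨m, hm, ?_, hle, ?_⟩
      · rcases hmem with h' | h'
        · exact Or.inl h'
        · exact Or.inr (List.mem_cons_of_mem _ h')
      · intro y hy
        rcases List.mem_cons.1 hy with h' | h'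
        · subst h'; exact pf_le2_trans hle hbw
        · exact hall y h'

theorem pf_fold_none (w : List Int) (t : List (List Int)) :
    ∃ m, (w :: t).foldl pf_upd none = some ((m.sum, m), m) ∧ pf_IsMin (w :: t) m := by
  rw [List.foldl_cons]
  obtain ⟨m, hm, hmem, hle, hall⟩ := pf_fold_some t w
  refine ⟨m, hm, ?_, ?_⟩
  · rcases hmem with h | h
    · exact h ▸ List.mem_cons_self
    · exact List.mem_cons_of_mem _ h
  · intro y hy
    rcases List.mem_cons.1 hy with h | h
    · subst h; exact hle
    · exact hall y h

-- the circular interval cycle, Nat-indexed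
def pf_cycN (seq : List Int) : List Int :=
  (List.range seq.length).map (fun j => pf_diff (seq.getD ((j + 1) % seq.length) 0) (seq.getD j 0))

theorem pf_cycN_length (seq : List Int) : (pf_cycN seq).length = seq.length := by
  simp [pf_cycN]

-- a length-(n-1) window of the doubled cycle
def pf_wnd (C : List Int) (k : Nat) : List Int := ((C ++ C).drop k).take (C.length - 1)

def pf_Bwin (seq : List Int) : List (List Int) :=
  [pf_cycN seq, (pf_cycN seq).reverse, pf_invert (pf_cycN seq), (pf_invert (pf_cycN seq)).reverse].flatMap
    (fun c => (List.range seq.length).map (pf_wnd c))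

theorem pf_wnd_eq_rotate (C : List Int) (k : Nat) (hk : k ≤ C.length) :
    pf_wnd C k = (C.rotate k).take (C.length - 1) := by
  unfold pf_wnd
  rw [List.rotate_eq_drop_append_take hk]
  have hdrop : (C ++ C).drop k = C.drop k ++ C := by
    rw [List.drop_append, Nat.sub_eq_zero_of_le hk, List.drop_zero]
  rw [hdrop, List.take_append, List.take_append, List.take_take,
    Nat.min_eq_left (by simp only [List.length_drop]; omega)]

theorem pf_rotate_drop_one (D : List Int) (hD : D ≠ []) (m : Nat) :
    (D.rotate m).drop 1 = (D.rotate (m + 1)).take (D.length - 1) := by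
  rw [← List.rotate_rotate]
  generalize hE : D.rotate m = E
  have hlen : E.length = D.length := by rw [← hE]; exact List.length_rotate D m
  have hpos : 0 < D.length := List.length_pos_of_ne_nil hD
  rw [List.rotate_eq_drop_append_take (by omega), List.take_left' (by simp [hlen])]

theorem pf_wnd_reverse (C : List Int) (hC : C ≠ []) (k : Nat) (hk : k < C.length) :
    (pf_wnd C k).reverse = pf_wnd C.reverse ((C.length - k + 1) % C.length) := by
  have hn : 0 < C.length := List.length_pos_of_ne_nil hC
  have h1 : (pf_wnd C k).reverse = (C.reverse.rotate (C.length - k + 1)).take (C.length - 1) := by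
    rw [pf_wnd_eq_rotate C k hk.le, List.reverse_take, List.length_rotate,
      (by omega : C.length - (C.length - 1) = 1), List.reverse_rotate,
      Nat.mod_eq_of_lt hk,
      pf_rotate_drop_one C.reverse (by simpa using hC) (C.length - k),
      List.length_reverse]
  have h2 : C.reverse.rotate ((C.length - k + 1) % C.length) = C.reverse.rotate (C.length - k + 1) := by
    have h := List.rotate_mod C.reverse (C.length - k + 1)
    rwa [List.length_reverse] at h
  rw [h1, pf_wnd_eq_rotate C.reverse _ (by rw [List.length_reverse]; exact (Nat.mod_lt _ hn).le),
    h2, List.length_reverse]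

theorem pf_wnd_map (C : List Int) (f : Int → Int) (k : Nat) :
    pf_wnd (C.map f) k = (pf_wnd C k).map f := by
  simp [pf_wnd, ← List.map_append, ← List.map_drop, ← List.map_take]

-- intervals via zip-with-tail; the port's slice form
theorem pf_intervals_eq (xs : List Int) :
    pf_intervals xs = (xs.zip xs.tail).map (fun p => pf_diff p.2 p.1) := by
  unfold pf_intervals
  rw [PySem.List.slice_from_one]

theorem pf_cycN_getElem (seq : List Int) (i : Nat) (h : i < (pf_cycN seq).length) :
    (pf_cycN seq)[i] = pf_diff (seq.getD ((i + 1) % seq.length) 0) (seq.getD i 0) := by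
  simp [pf_cycN]

theorem pf_intervals_rotate (seq : List Int) (k : Nat) (hk : k < seq.length) :
    pf_intervals (seq.rotate k) = pf_wnd (pf_cycN seq) k := by
  have hn : 0 < seq.length := by omega
  rw [pf_intervals_eq, pf_wnd_eq_rotate _ _ (by rw [pf_cycN_length]; omega)]
  apply List.ext_getElem
  · simp only [List.length_map, List.length_zip, List.length_tail, List.length_rotate,
      List.length_take, pf_cycN_length]
    omega
  · intro j h1 h2
    simp only [List.getElem_map, List.getElem_zip, List.getElem_tail, List.getElem_take,
      List.getElem_rotate, pf_cycN_length, pf_cycN_getElem]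
    rw [List.getD_eq_getElem _ _ (Nat.mod_lt _ hn), List.getD_eq_getElem _ _ (Nat.mod_lt _ hn)]
    have hidx : ((j + k) % seq.length + 1) % seq.length = (j + 1 + k) % seq.length := by
      rw [Nat.mod_add_mod, Nat.add_right_comm]
    simp only [hidx]

theorem pf_rot_slice (seq : List Int) (k : Nat) (hk : k ≤ seq.length) :
    pf_rotate seq (k : Int) = seq.rotate k := by
  unfold pf_rotate
  rw [PySem.List.slice_from_natCast, PySem.List.slice_to_natCast,
    List.rotate_eq_drop_append_take hk]

theorem pf_chunk_eq (seq : List Int) (i : Nat) (hi : i < seq.length) :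
    pf_chunk seq (i : Int) =
      [pf_wnd (pf_cycN seq) i, (pf_wnd (pf_cycN seq) i).reverse,
       pf_wnd (pf_invert (pf_cycN seq)) i, (pf_wnd (pf_invert (pf_cycN seq)) i).reverse] := by
  unfold pf_chunk
  rw [pf_rot_slice seq i hi.le, pf_intervals_rotate seq i hi, pf_intervals_invert,
    pf_intervals_rotate seq i hi,
    show pf_invert (pf_wnd (pf_cycN seq) i) = pf_wnd (pf_invert (pf_cycN seq)) i from by
      unfold pf_invert; rw [pf_wnd_map]]

theorem pf_cyc_port (seq : List Int) :
    (PySem.List.pyRange 0 (PySem.List.len seq) 1).map (fun j =>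
      PySem.Int.mod (PySem.List.pyGetD seq (PySem.Int.mod (j + 1) (PySem.List.len seq)) 0
        - PySem.List.pyGetD seq j 0) 12) = pf_cycN seq := by
  rw [show PySem.List.len seq = (seq.length : Int) from by simp [PySem.List.len],
    PySem.List.pyRange_zero_natCast, List.map_map]
  unfold pf_cycN
  apply List.map_congr_left
  intro j hj
  rw [List.mem_range] at hj
  simp only [Function.comp]
  rw [show ((j : Int) + 1) = ((j + 1 : Nat) : Int) from by push_cast; ring,
    PySem.Int.mod_natCast, PySem.List.pyGetD_natCast, PySem.List.pyGetD_natCast]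
  rfl

theorem pf_slice_wnd (C : List Int) (nn : Nat) (hC : C.length = nn) (hn : 0 < nn) (j : Nat) :
    PySem.List.slice (C ++ C) (some (j : Int)) (some ((j : Int) + (nn : Int) - 1)) = pf_wnd C j := by
  rw [show ((j : Int) + (nn : Int) - 1) = ((j + nn - 1 : Nat) : Int) from by omega,
    PySem.List.slice_natCast]
  unfold pf_wnd
  rw [hC]
  congr 1
  omega

theorem pf_mem_iff (seq : List Int) (hs : seq ≠ []) (x : List Int) :
    x ∈ pf_Bwin seq ↔ x ∈ pf_cands seq := by
  have hn : 0 < seq.length := List.length_pos_of_ne_nil hs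
  have hclen : (pf_cycN seq).length = seq.length := pf_cycN_length seq
  have hcne : pf_cycN seq ≠ [] := by
    rw [← List.length_pos_iff, hclen]; exact hn
  have hilen : (pf_invert (pf_cycN seq)).length = seq.length := by
    simp [pf_invert, hclen]
  have hine : pf_invert (pf_cycN seq) ≠ [] := by
    rw [← List.length_pos_iff, hilen]; exact hn
  have hmemA : ∀ (iN : Nat), iN < seq.length →
      ∀ y ∈ [pf_wnd (pf_cycN seq) iN, (pf_wnd (pf_cycN seq) iN).reverse,
             pf_wnd (pf_invert (pf_cycN seq)) iN, (pf_wnd (pf_invert (pf_cycN seq)) iN).reverse],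
      y ∈ pf_cands seq := by
    intro iN hiN y hy
    unfold pf_cands
    rw [List.mem_flatMap]
    refine ⟨(iN : Int), ?_, ?_⟩
    · rw [PySem.List.mem_pyRange_one]
      refine ⟨Int.natCast_nonneg iN, ?_⟩
      rw [show PySem.List.len seq = (seq.length : Int) from by simp [PySem.List.len]]
      exact_mod_cast hiN
    · rw [pf_chunk_eq seq iN hiN]
      exact hy
  have hmemBwin : ∀ (c : List Int),
      c ∈ [pf_cycN seq, (pf_cycN seq).reverse, pf_invert (pf_cycN seq), (pf_invert (pf_cycN seq)).reverse] →
      ∀ kN, kN < seq.length → pf_wnd c kN ∈ pf_Bwin seq := by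
    intro c hc kN hkN
    unfold pf_Bwin
    rw [List.mem_flatMap]
    exact ⟨c, hc, List.mem_map.2 ⟨kN, List.mem_range.2 hkN, rfl⟩⟩
  constructor
  · intro hx
    simp only [pf_Bwin, List.mem_flatMap, List.mem_map, List.mem_range] at hx
    obtain ⟨c, hc, kN, hkN, rfl⟩ := hx
    simp only [List.mem_cons, List.not_mem_nil, or_false] at hc
    rcases hc with rfl | rfl | rfl | rfl
    · exact hmemA kN hkN _ (by simp)
    · -- window of the reversed cycle is the reverse of some ordinal window
      have h := pf_wnd_reverse (pf_cycN seq).reverse (by simpa using hcne) kN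
        (by rw [List.length_reverse, hclen]; exact hkN)
      rw [List.reverse_reverse, List.length_reverse, hclen] at h
      have hx2 : pf_wnd (pf_cycN seq).reverse kN
          = (pf_wnd (pf_cycN seq) ((seq.length - kN + 1) % seq.length)).reverse := by
        rw [← h, List.reverse_reverse]
      rw [hx2]
      exact hmemA ((seq.length - kN + 1) % seq.length) (Nat.mod_lt _ hn) _ (by simp)
    · exact hmemA kN hkN _ (by simp)
    · have h := pf_wnd_reverse (pf_invert (pf_cycN seq)).reverse (by simpa using hine) kN
        (by rw [List.length_reverse, hilen]; exact hkN)
      rw [List.reverse_reverse, List.length_reverse, hilen] at h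
      have hx2 : pf_wnd (pf_invert (pf_cycN seq)).reverse kN
          = (pf_wnd (pf_invert (pf_cycN seq)) ((seq.length - kN + 1) % seq.length)).reverse := by
        rw [← h, List.reverse_reverse]
      rw [hx2]
      exact hmemA ((seq.length - kN + 1) % seq.length) (Nat.mod_lt _ hn) _ (by simp)
  · intro hx
    unfold pf_cands at hx
    rw [List.mem_flatMap] at hx
    obtain ⟨i, hi, hxi⟩ := hx
    rw [PySem.List.mem_pyRange_one,
      show PySem.List.len seq = (seq.length : Int) from by simp [PySem.List.len]] at hi
    obtain ⟨iN, rfl⟩ := Int.eq_ofNat_of_zero_le hi.1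
    have hiN : iN < seq.length := by exact_mod_cast hi.2
    rw [pf_chunk_eq seq iN hiN] at hxi
    simp only [List.mem_cons, List.not_mem_nil, or_false] at hxi
    rcases hxi with rfl | rfl | rfl | rfl
    · exact hmemBwin _ (by simp) iN hiN
    · rw [pf_wnd_reverse (pf_cycN seq) hcne iN (by rw [hclen]; exact hiN), hclen]
      exact hmemBwin _ (by simp) _ (Nat.mod_lt _ hn)
    · exact hmemBwin _ (by simp) iN hiN
    · rw [pf_wnd_reverse (pf_invert (pf_cycN seq)) hine iN (by rw [hilen]; exact hiN), hilen]
      exact hmemBwin _ (by simp) _ (Nat.mod_lt _ hn)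

-- the port's nested best-tracking loop is the flat fold of pf_upd over the window list
theorem pf_fold_port (seq : List Int) :
    ([pf_cycN seq, (pf_cycN seq).reverse, (pf_cycN seq).map (fun d => PySem.Int.mod (12 - d) 12),
      ((pf_cycN seq).map (fun d => PySem.Int.mod (12 - d) 12)).reverse].foldl (fun best c =>
        (PySem.List.pyRange 0 (PySem.List.len seq) 1).foldl (fun best k =>
          let w := PySem.List.slice (c ++ c) (some k) (some (k + PySem.List.len seq - 1))
          let key := (w.sum, w)
          match best with
          | none => some (key, w)
          | some b => if pf_keyLtB key b.1 then some (key, w) else best) best) none)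
    = (pf_Bwin seq).foldl pf_upd none := by
  have hlen : ∀ c : List Int,
      c ∈ [pf_cycN seq, (pf_cycN seq).reverse, (pf_cycN seq).map (fun d => PySem.Int.mod (12 - d) 12),
           ((pf_cycN seq).map (fun d => PySem.Int.mod (12 - d) 12)).reverse] →
      c.length = seq.length := by
    intro c hc
    simp only [List.mem_cons, List.not_mem_nil, or_false] at hc
    rcases hc with rfl | rfl | rfl | rfl <;> simp [pf_cycN_length]
  unfold pf_Bwin pf_invert
  rw [List.foldl_flatMap]
  apply PySem.List.foldl_congr_mem
  intro b c hc
  rw [show PySem.List.len seq = (seq.length : Int) from by simp [PySem.List.len],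
    PySem.List.pyRange_zero_natCast, List.foldl_map, List.foldl_map]
  apply PySem.List.foldl_congr_mem
  intro b' j hj
  rw [List.mem_range] at hj
  show pf_upd b' (PySem.List.slice (c ++ c) (some (j : Int)) (some ((j : Int) + (seq.length : Int) - 1)))
      = pf_upd b' (pf_wnd c j)
  rw [pf_slice_wnd c seq.length (hlen c hc) (by omega) j]

-- B's port equals the flat fold of pf_upd over pf_Bwin
theorem pf_alt_eq (s : List Int) :
    get_prime_form_alt s =
      (match (pf_Bwin (PySem.List.sorted (PySem.Set.ofList s) (fun x => x))).foldl pf_upd none with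
       | none => []
       | some b => pf_renumerate b.2) := by
  unfold get_prime_form_alt
  dsimp only
  rw [pf_cyc_port, pf_fold_port]

theorem pf_seq_ne_nil (s : List Int) (hs : s ≠ []) :
    PySem.List.sorted (PySem.Set.ofList s) (fun x => x) ≠ [] := by
  obtain ⟨a, t, rfl⟩ := List.exists_cons_of_ne_nil hs
  apply List.ne_nil_of_mem (a := a)
  exact (PySem.List.mem_sorted _ _ _ _).2 ((PySem.Set.mem_ofList _ _).2 (by simp))

-- ===== VERDICT (by name: the statement is the Claim_ definition above) =====
theorem get_prime_form_spec : Claim_equal_get_prime_form := by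
  intro s _ hpre
  unfold Spec_get_prime_form
  show get_prime_form s = get_prime_form_alt s
  -- A's side: the two sorted heads pick the pf_le2-minimum of pf_cands
  unfold get_prime_form
  simp only []
  rw [pf_dict_eq]
  set seq := PySem.List.sorted (PySem.Set.ofList s) (fun x => x) with hseq
  have hne := pf_cands_ne_nil s hpre
  rw [← hseq] at hne
  set l := pf_cands seq with hl
  have hkeys : (l.foldl pf_step PySem.Dict.empty).keys = PySem.Set.ofList (l.map List.sum) := by
    rw [pf_keys_fold]; rfl
  obtain ⟨c0, t0, hcons⟩ := List.exists_cons_of_ne_nil hne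
  have hks_ne : PySem.List.sorted ((l.foldl pf_step PySem.Dict.empty).keys) (fun x => x) ≠ [] := by
    rw [Ne, PySem.List.sorted_eq_nil_iff, hkeys]
    apply List.ne_nil_of_mem (a := c0.sum)
    exact (PySem.Set.mem_ofList _ _).2 (List.mem_map_of_mem (by rw [hcons]; simp))
  obtain ⟨k0, kt, hsk⟩ := List.exists_cons_of_ne_nil hks_ne
  have hk0mem : k0 ∈ l.map List.sum := by
    have : k0 ∈ PySem.List.sorted ((l.foldl pf_step PySem.Dict.empty).keys) (fun x => x) := by
      rw [hsk]; exact List.mem_cons_self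
    rw [PySem.List.mem_sorted, hkeys] at this
    exact (PySem.Set.mem_ofList _ _).1 this
  obtain ⟨c, hcl, hcs⟩ := List.mem_map.1 hk0mem
  have hgrp_ne : PySem.List.sorted ((l.foldl pf_step PySem.Dict.empty).getD k0 []) (fun x => x) ≠ [] := by
    rw [Ne, PySem.List.sorted_eq_nil_iff]
    have : (l.foldl pf_step PySem.Dict.empty).getD k0 [] = l.filter (fun c => c.sum == k0) := by
      rw [pf_getD_fold]; rfl
    rw [this]
    apply List.ne_nil_of_mem (a := c)
    exact List.mem_filter.2 ⟨hcl, by simpa using hcs⟩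
  obtain ⟨m, mt, hsg⟩ := List.exists_cons_of_ne_nil hgrp_ne
  rw [hsk]
  dsimp only
  rw [hsg]
  dsimp only
  have hAmin : pf_IsMin l m := pf_heads_isMin l k0 kt m mt hsk hsg
  -- B's side: the online fold picks the pf_le2-minimum of pf_Bwin
  rw [pf_alt_eq s, ← hseq]
  have hsne : seq ≠ [] := pf_seq_ne_nil s hpre
  have hBne : pf_Bwin seq ≠ [] := by
    obtain ⟨y, hy⟩ := List.exists_mem_of_ne_nil _ hne
    exact List.ne_nil_of_mem ((pf_mem_iff seq hsne y).2 hy)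
  obtain ⟨w0, wt, hwcons⟩ := List.exists_cons_of_ne_nil hBne
  obtain ⟨mB, hmB, hBmin⟩ := pf_fold_none w0 wt
  rw [hwcons, hmB]
  dsimp only
  rw [← hwcons] at hBmin
  exact congrArg pf_renumerate (pf_IsMin_unique (fun x => pf_mem_iff seq hsne x) hBmin hAmin).symm
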